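-- pv_equiv track=rewrite | github.com/alsonder/golfie | global_values/fill_cross.py | fill_polygon
-- ===== SOURCE A (Python) =====
-- def fill_polygon(polygon_points):
--     from collections import defaultdict
--
--     def bresenham_line(x0, y0, x1, y1):
--         points = []
--         dx = abs(x1 - x0)
--         dy = abs(y1 - y0)
--         sx = 1 if x0 < x1 else -1
--         sy = 1 if y0 < y1 else -1
--         err = dx - dy
--
--         while True:
--             points.append((x0, y0))
--             if x0 == x1 and y0 == y1:
--                 break
--             e2 = err * 2
--             if e2 > -dy:
--                 err -= dy
--                 x0 += sx
--             if e2 < dx: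
--                 err += dx
--                 y0 += sy
--
--         return points
--
--     # Generate all edge points
--     edge_points = []
--     num_points = len(polygon_points)
--     for i in range(num_points):
--         x0, y0 = polygon_points[i]
--         x1, y1 = polygon_points[(i + 1) % num_points]
--         edge_points.extend(bresenham_line(x0, y0, x1, y1))
--
--     # Sort edge points by y-coordinate
--     edge_points = sorted(edge_points, key=lambda p: (p[1], p[0]))
--     y_min = edge_points[0][1]
--     y_max = edge_points[-1][1]
--
--     # Create a dictionary to hold the x-coordinates for each y-coordinate
--     scanline = defaultdict(list)
--     for x, y in edge_points:
--         scanline[y].append(x)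
--
--     # Fill the polygon
--     filled_points = []
--     for y in range(y_min, y_max + 1):
--         if y in scanline:
--             x_points = sorted(scanline[y])
--             for x in range(x_points[0], x_points[-1] + 1):
--                 filled_points.append((x, y))
--
--     return filled_points
-- ===== SOURCE B (Python) =====
-- def fill_polygon(polygon_points):
--     # B: one pass over the edge points keeping per-row (min x, max x) bounds and the
--     # overall y-range; no sorting at all.  Same edge rasterization as A.
--     def bresenham_line(x0, y0, x1, y1):
--         points = []
--         dx = abs(x1 - x0)
--         dy = abs(y1 - y0)
--         sx = 1 if x0 < x1 else -1
--         sy = 1 if y0 < y1 else -1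
--         err = dx - dy
--
--         while True:
--             points.append((x0, y0))
--             if x0 == x1 and y0 == y1:
--                 break
--             e2 = err * 2
--             if e2 > -dy:
--                 err -= dy
--                 x0 += sx
--             if e2 < dx:
--                 err += dx
--                 y0 += sy
--
--         return points
--
--     edge_points = []
--     num_points = len(polygon_points)
--     for i in range(num_points):
--         x0, y0 = polygon_points[i]
--         x1, y1 = polygon_points[(i + 1) % num_points]
--         edge_points.extend(bresenham_line(x0, y0, x1, y1))
--
--     bounds = {}
--     y_min = None
--     y_max = None
--     for x, y in edge_points:
--         b = bounds.get(y)
--         if b is None: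
--             bounds[y] = (x, x)
--             y_min = y if y_min is None else min(y_min, y)
--             y_max = y if y_max is None else max(y_max, y)
--         else:
--             bounds[y] = (min(b[0], x), max(b[1], x))
--
--     filled_points = []
--     for y in range(y_min, y_max + 1):
--         b = bounds.get(y)
--         if b is not None:
--             for x in range(b[0], b[1] + 1):
--                 filled_points.append((x, y))
--     return filled_points
-- ===== Notes on version B (the rewrite author's own statement) =====
-- stated objective: simpler
-- what changed: Instead of sorting all edge points by (y,x), indexing the extremes, grouping x's per row in a defaultdict and re-sorting each row, B makes one pass over the edge points maintaining a per-row (min x, max x) dict and the overall y-range, then emits the same fill loop; both sorts disappear.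
import Mathlib
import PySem

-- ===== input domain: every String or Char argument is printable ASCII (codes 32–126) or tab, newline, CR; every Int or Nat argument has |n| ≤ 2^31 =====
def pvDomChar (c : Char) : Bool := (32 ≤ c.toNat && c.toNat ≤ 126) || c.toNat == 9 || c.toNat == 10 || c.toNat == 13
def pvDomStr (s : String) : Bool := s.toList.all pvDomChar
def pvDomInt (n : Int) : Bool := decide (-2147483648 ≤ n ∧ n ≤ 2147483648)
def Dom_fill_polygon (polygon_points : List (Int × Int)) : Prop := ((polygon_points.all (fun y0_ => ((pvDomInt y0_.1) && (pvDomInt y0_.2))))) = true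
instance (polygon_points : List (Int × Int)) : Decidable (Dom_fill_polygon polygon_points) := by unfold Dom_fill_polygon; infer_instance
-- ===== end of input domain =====

-- B drops both sorts of A: one pass over the edge points keeps per-row (min x, max x) and the
-- overall y-range; same rasterized edges, identical output order (objective: simpler).

-- ===== PORT A =====
-- bresenham_line and the edge-point generation loop are textually identical in A and B,
-- so they are shared helpers of both ports.
-- The while-True loop; (dx+dy)+1 fuel steps always suffice (each iteration moves x and/or
-- y one step toward the target), so the fuel-0 branch is never reached.
def pvBresLoop (x1 y1 dx dy sx sy : Int) (fuel : Nat) (x0 y0 err : Int)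
    (points : List (Int × Int)) : List (Int × Int) :=
  match fuel with
  | 0 => points ++ [(x0, y0)]
  | fuel + 1 =>
    let points := points ++ [(x0, y0)]
    if x0 = x1 ∧ y0 = y1 then points
    else
      let e2 := err * 2
      let err1 := if e2 > -dy then err - dy else err
      let x0' := if e2 > -dy then x0 + sx else x0
      let err2 := if e2 < dx then err1 + dx else err1
      let y0' := if e2 < dx then y0 + sy else y0
      pvBresLoop x1 y1 dx dy sx sy fuel x0' y0' err2 points

def bresenham_line (x0 y0 x1 y1 : Int) : List (Int × Int) :=
  let dx := |x1 - x0|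
  let dy := |y1 - y0|
  let sx : Int := if x0 < x1 then 1 else -1
  let sy : Int := if y0 < y1 then 1 else -1
  let err := dx - dy
  pvBresLoop x1 y1 dx dy sx sy (dx + dy).toNat.succ x0 y0 err []

def pvEdgePoints (polygon_points : List (Int × Int)) : List (Int × Int) :=
  let num_points : Int := PySem.List.len polygon_points
  (PySem.List.pyRange 0 num_points 1).foldl (fun acc i =>
    let p0 := PySem.List.pyGetD polygon_points i (0, 0)
    let p1 := PySem.List.pyGetD polygon_points (PySem.Int.mod (i + 1) num_points) (0, 0)
    acc ++ bresenham_line p0.1 p0.2 p1.1 p1.2) []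

def fill_polygon (polygon_points : List (Int × Int)) : List (Int × Int) :=
  let edge_points := pvEdgePoints polygon_points
  let es := PySem.List.sorted2 edge_points (fun p => p.2) (fun p => p.1)
  let y_min := (PySem.List.pyGetD es 0 (0, 0)).2
  let y_max := (PySem.List.pyGetD es (-1) (0, 0)).2
  let scanline := es.foldl
    (fun (d : PySem.Dict Int (List Int)) p => d.modify p.2 [] (· ++ [p.1])) PySem.Dict.empty
  (PySem.List.pyRange y_min (y_max + 1) 1).foldl (fun acc y =>
    if scanline.contains y then
      let x_points := PySem.List.sorted (scanline.getD y []) (fun x => x)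
      (PySem.List.pyRange (PySem.List.pyGetD x_points 0 0)
          (PySem.List.pyGetD x_points (-1) 0 + 1) 1).foldl
        (fun acc x => acc ++ [(x, y)]) acc
    else acc) []

-- ===== PORT B =====
-- the body of B's single bookkeeping pass ('b = bounds.get(y)' branch)
def pvStep (st : PySem.Dict Int (Int × Int) × Option Int × Option Int) (p : Int × Int) :
    PySem.Dict Int (Int × Int) × Option Int × Option Int :=
  match st.1.get? p.2 with
  | none =>
      (st.1.insert p.2 (p.1, p.1),
       some (match st.2.1 with | none => p.2 | some m => min m p.2),
       some (match st.2.2 with | none => p.2 | some m => max m p.2))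
  | some b => (st.1.insert p.2 (min b.1 p.1, max b.2 p.1), st.2.1, st.2.2)

def fill_polygon_alt (polygon_points : List (Int × Int)) : List (Int × Int) :=
  let edge_points := pvEdgePoints polygon_points
  let st := edge_points.foldl pvStep (PySem.Dict.empty, none, none)
  match st.2.1, st.2.2 with
  | some y_min, some y_max =>
    (PySem.List.pyRange y_min (y_max + 1) 1).foldl (fun acc y =>
      match st.1.get? y with
      | some b =>
        (PySem.List.pyRange b.1 (b.2 + 1) 1).foldl (fun acc x => acc ++ [(x, y)]) acc
      | none => acc) []
  | _, _ => []   -- Python B raises TypeError here (empty polygon only); outside Pre_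

-- ===== PRECONDITION & SPEC =====
-- A raises IndexError (edge_points[0]) exactly on the empty polygon; excluded.
def Pre_fill_polygon (polygon_points : List (Int × Int)) : Prop := polygon_points ≠ []
instance (polygon_points : List (Int × Int)) : Decidable (Pre_fill_polygon polygon_points) := by
  unfold Pre_fill_polygon; infer_instance
def pvWitness_fill_polygon : (List (Int × Int)) := [(0, 0), (4, 0), (2, 3)]
def Spec_fill_polygon (polygon_points : List (Int × Int)) (out : List (Int × Int)) : Prop := out = fill_polygon_alt polygon_points
instance (polygon_points : List (Int × Int)) (out : List (Int × Int)) : Decidable (Spec_fill_polygon polygon_points out) := by unfold Spec_fill_polygon; infer_instance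

-- ===== CLAIM (what is proved, stated in full; the proofs are below) =====
def Claim_equal_fill_polygon : Prop := ∀ (polygon_points : List (Int × Int)), Dom_fill_polygon polygon_points → Pre_fill_polygon polygon_points → Spec_fill_polygon polygon_points (fill_polygon polygon_points)

-- ===== LEMMAS AND PROOFS =====

theorem pvBresLoop_ne_nil (x1 y1 dx dy sx sy : Int) (fuel : Nat) (x0 y0 err : Int)
    (pts : List (Int × Int)) : pvBresLoop x1 y1 dx dy sx sy fuel x0 y0 err pts ≠ [] := by
  induction fuel generalizing x0 y0 err pts with
  | zero => simp [pvBresLoop]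
  | succ n ih =>
    rw [pvBresLoop]
    split
    · simp
    · exact ih _ _ _ _


theorem bresenham_line_ne_nil (x0 y0 x1 y1 : Int) : bresenham_line x0 y0 x1 y1 ≠ [] := by
  unfold bresenham_line
  exact pvBresLoop_ne_nil _ _ _ _ _ _ _ _ _ _ _

theorem pvEdgePoints_ne_nil (pp : List (Int × Int)) (h : pp ≠ []) : pvEdgePoints pp ≠ [] := by
  unfold pvEdgePoints
  rw [PySem.List.foldl_append_eq_flatMap]
  have hn : (0 : Int) < PySem.List.len pp := by
    simp only [PySem.List.len_eq]
    exact_mod_cast List.length_pos_iff.mpr h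
  rw [PySem.List.pyRange_one_cons hn]
  simp only [List.flatMap_cons, List.nil_append]
  intro hc
  exact bresenham_line_ne_nil _ _ _ _ (List.append_eq_nil_iff.mp hc).1

-- B-side closed forms for the one-pass bookkeeping -------------------------------

def pvMM : Option (Int × Int) → List Int → Option (Int × Int)
  | b, [] => b
  | none, x :: xs => pvMM (some (x, x)) xs
  | some b, x :: xs => pvMM (some (min b.1 x, max b.2 x)) xs

def pvOMin : Option Int → List Int → Option Int
  | o, [] => o
  | none, y :: ys => pvOMin (some y) ys
  | some m, y :: ys => pvOMin (some (min m y)) ys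

def pvOMax : Option Int → List Int → Option Int
  | o, [] => o
  | none, y :: ys => pvOMax (some y) ys
  | some m, y :: ys => pvOMax (some (max m y)) ys

theorem pvMM_some (xs : List Int) (l h : Int) :
    pvMM (some (l, h)) xs = some (xs.foldl min l, xs.foldl max h) := by
  induction xs generalizing l h with
  | nil => simp [pvMM]
  | cons x xs ih => simp [pvMM, List.foldl_cons, ih]

theorem pvOMin_some (ys : List Int) (m : Int) :
    pvOMin (some m) ys = some (ys.foldl min m) := by
  induction ys generalizing m with
  | nil => simp [pvOMin]
  | cons y ys ih => simp [pvOMin, List.foldl_cons, ih]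

theorem pvOMax_some (ys : List Int) (m : Int) :
    pvOMax (some m) ys = some (ys.foldl max m) := by
  induction ys generalizing m with
  | nil => simp [pvOMax]
  | cons y ys ih => simp [pvOMax, List.foldl_cons, ih]

-- sorted2 keeps the primary key weakly increasing ---------------------------------

theorem pairwise_key_insertBy {α : Type} (before : α → α → Bool) (key : α → Int)
    (hb : ∀ a b, (before a b = true → key a ≤ key b) ∧ (before a b = false → key b ≤ key a))
    (x : α) (ys : List α) (hp : ys.Pairwise (fun a b => key a ≤ key b)) :
    (PySem.List.insertBy before x ys).Pairwise (fun a b => key a ≤ key b) := by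
  induction ys with
  | nil => simp [PySem.List.insertBy]
  | cons y ys ih =>
    rw [PySem.List.insertBy]
    rcases List.pairwise_cons.mp hp with ⟨hy, hys⟩
    split
    · rename_i hxy
      refine List.pairwise_cons.mpr ⟨?_, hp⟩
      intro z hz
      rcases List.mem_cons.mp hz with rfl | hz
      · exact (hb x z).1 hxy
      · exact le_trans ((hb x y).1 hxy) (hy z hz)
    · rename_i hxy
      refine List.pairwise_cons.mpr ⟨?_, ih hys⟩
      intro z hz
      rcases (PySem.List.mem_insertBy before x z ys).mp hz with rfl | hz
      · exact (hb z y).2 (Bool.of_not_eq_true hxy)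
      · exact hy z hz

theorem sorted2_pairwise_snd (xs : List (Int × Int)) :
    (PySem.List.sorted2 xs (fun p => p.2) (fun p => p.1)).Pairwise (fun a b => a.2 ≤ b.2) := by
  show (List.foldl (fun acc x => PySem.List.insertBy _ x acc) [] xs).Pairwise _
  generalize hacc : ([] : List (Int × Int)) = acc
  have hpacc : acc.Pairwise (fun a b : Int × Int => a.2 ≤ b.2) := by
    rw [← hacc]; exact List.Pairwise.nil
  clear hacc
  induction xs generalizing acc with
  | nil => exact hpacc
  | cons p xs ih =>
    rw [List.foldl_cons]
    refine ih _ (pairwise_key_insertBy _ (fun q : Int × Int => q.2) ?_ p acc hpacc)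
    intro a b
    constructor
    · intro h
      rcases Bool.or_eq_true_iff.mp h with h1 | h2
      · exact le_of_lt (of_decide_eq_true h1)
      · rcases Bool.and_eq_true_iff.mp h2 with ⟨h3, _⟩
        exact le_of_not_gt (of_decide_eq_false (Bool.not_eq_true' _ |>.mp h3))
    · intro h
      rcases Bool.or_eq_false_iff.mp h with ⟨h1, _⟩
      exact le_of_not_gt (of_decide_eq_false h1)

theorem head_min_of_pairwise {α : Type} (key : α → Int) {m : α} {t l : List α}
    (hl : l = m :: t) (hp : l.Pairwise (fun a b => key a ≤ key b)) :
    ∀ y ∈ l, key m ≤ key y := by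
  subst hl
  intro y hy
  rcases List.mem_cons.mp hy with rfl | hy
  · exact le_refl _
  · exact (List.pairwise_cons.mp hp).1 y hy

theorem getLast_max_of_pairwise {α : Type} (key : α → Int) {l : List α} (h : l ≠ [])
    (hp : l.Pairwise (fun a b => key a ≤ key b)) :
    ∀ y ∈ l, key y ≤ key (l.getLast h) := by
  induction l with
  | nil => cases h rfl
  | cons a l ih =>
    intro y hy
    rcases List.pairwise_cons.mp hp with ⟨ha, hl'⟩
    by_cases hlne : l = []
    · subst hlne
      simp only [List.getLast_singleton]
      rcases List.mem_singleton.mp hy with rfl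
      exact le_refl _
    · rw [List.getLast_cons hlne]
      rcases List.mem_cons.mp hy with rfl | hy
      · exact ha _ (List.getLast_mem hlne)
      · exact ih hlne hl' y hy

-- the one-pass fold of B, characterized ------------------------------------------

def pvNMin (o : Option Int) (y : Int) : Int := match o with | none => y | some m => min m y
def pvNMax (o : Option Int) (y : Int) : Int := match o with | none => y | some m => max m y

theorem pvOMin_cons (o : Option Int) (y : Int) (ys : List Int) :
    pvOMin o (y :: ys) = pvOMin (some (pvNMin o y)) ys := by
  cases o <;> rfl

theorem pvOMax_cons (o : Option Int) (y : Int) (ys : List Int) :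
    pvOMax o (y :: ys) = pvOMax (some (pvNMax o y)) ys := by
  cases o <;> rfl

theorem pvNMin_le (o : Option Int) (y : Int) : pvNMin o y ≤ y := by
  cases o with
  | none => exact le_refl _
  | some m => exact min_le_right _ _

theorem pvNMax_ge (o : Option Int) (y : Int) : y ≤ pvNMax o y := by
  cases o with
  | none => exact le_refl _
  | some m => exact le_max_right _ _

theorem pvStep_none (d : PySem.Dict Int (Int × Int)) (om oM : Option Int) (p : Int × Int)
    (hd : d.get? p.2 = none) :
    pvStep (d, om, oM) p =
      (d.insert p.2 (p.1, p.1), some (pvNMin om p.2), some (pvNMax oM p.2)) := by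
  simp only [pvStep, hd]
  cases om <;> cases oM <;> rfl

theorem pvStep_some (d : PySem.Dict Int (Int × Int)) (om oM : Option Int) (p : Int × Int)
    (b : Int × Int) (hd : d.get? p.2 = some b) :
    pvStep (d, om, oM) p = (d.insert p.2 (min b.1 p.1, max b.2 p.1), om, oM) := by
  simp only [pvStep, hd]

theorem pvStep_foldl (ep : List (Int × Int)) :
    ∀ (d : PySem.Dict Int (Int × Int)) (om oM : Option Int),
    (∀ y v, d.get? y = some v → ∃ m M, om = some m ∧ oM = some M ∧ m ≤ y ∧ y ≤ M) →
    (∀ y, (ep.foldl pvStep (d, om, oM)).1.get? y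
        = pvMM (d.get? y) ((ep.filter (fun p => p.2 == y)).map (fun p => p.1)))
    ∧ (ep.foldl pvStep (d, om, oM)).2.1 = pvOMin om (ep.map (fun p => p.2))
    ∧ (ep.foldl pvStep (d, om, oM)).2.2 = pvOMax oM (ep.map (fun p => p.2)) := by
  induction ep with
  | nil =>
    intro d om oM _
    refine ⟨fun y => ?_, rfl, rfl⟩
    simp [pvMM]
  | cons p ep ih =>
    intro d om oM H
    rw [List.foldl_cons]
    cases hd : d.get? p.2 with
    | none =>
      rw [pvStep_none d om oM p hd]
      have H' : ∀ y v, (d.insert p.2 (p.1, p.1)).get? y = some v →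
          ∃ m M, (some (pvNMin om p.2)) = some m ∧ (some (pvNMax oM p.2)) = some M ∧
                 m ≤ y ∧ y ≤ M := by
        intro y v hv
        rw [PySem.Dict.get?_insert] at hv
        by_cases hy : y = p.2
        · exact ⟨_, _, rfl, rfl, hy ▸ pvNMin_le om p.2, hy ▸ pvNMax_ge oM p.2⟩
        · rw [if_neg hy] at hv
          obtain ⟨m, M, hm, hM, hmy, hyM⟩ := H y v hv
          subst hm; subst hM
          exact ⟨_, _, rfl, rfl,
                 le_trans (le_trans (min_le_left _ _) hmy) (le_refl _),
                 le_trans hyM (le_max_left _ _)⟩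
      obtain ⟨h1, h2, h3⟩ := ih _ _ _ H'
      refine ⟨fun y => ?_, ?_, ?_⟩
      · rw [h1 y, List.filter_cons]
        by_cases hy : p.2 = y
        · subst hy
          simp only [BEq.rfl, if_pos, List.map_cons, PySem.Dict.get?_insert_self, hd]
          rfl
        · have hbeq : (p.2 == y) = false := beq_false_of_ne hy
          simp only [hbeq, Bool.false_eq_true, if_neg, not_false_iff]
          rw [PySem.Dict.get?_insert_of_ne d _ (Ne.symm hy)]
      · rw [h2, List.map_cons, pvOMin_cons]
      · rw [h3, List.map_cons, pvOMax_cons]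
    | some b =>
      rw [pvStep_some d om oM p b hd]
      obtain ⟨m, M, hm, hM, hmy, hyM⟩ := H p.2 b hd
      have H' : ∀ y v, (d.insert p.2 (min b.1 p.1, max b.2 p.1)).get? y = some v →
          ∃ m' M', om = some m' ∧ oM = some M' ∧ m' ≤ y ∧ y ≤ M' := by
        intro y v hv
        rw [PySem.Dict.get?_insert] at hv
        by_cases hy : y = p.2
        · subst hy; exact ⟨m, M, hm, hM, hmy, hyM⟩
        · rw [if_neg hy] at hv
          exact H y v hv
      obtain ⟨h1, h2, h3⟩ := ih _ _ _ H'
      refine ⟨fun y => ?_, ?_, ?_⟩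
      · rw [h1 y, List.filter_cons]
        by_cases hy : p.2 = y
        · subst hy
          simp only [BEq.rfl, if_pos, List.map_cons, PySem.Dict.get?_insert_self, hd]
          rfl
        · have hbeq : (p.2 == y) = false := beq_false_of_ne hy
          simp only [hbeq, Bool.false_eq_true, if_neg, not_false_iff]
          rw [PySem.Dict.get?_insert_of_ne d _ (Ne.symm hy)]
      · rw [h2, List.map_cons, pvOMin_cons]
        subst hm
        show _ = pvOMin (some (min m p.2)) _
        rw [min_eq_left hmy]
      · rw [h3, List.map_cons, pvOMax_cons]
        subst hM
        show _ = pvOMax (some (max M p.2)) _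
        rw [max_eq_left hyM]

-- A's row dictionary, characterized ----------------------------------------------

theorem scanline_getD (es : List (Int × Int)) (y : Int) :
    (es.foldl (fun (d : PySem.Dict Int (List Int)) p => d.modify p.2 [] (· ++ [p.1]))
        PySem.Dict.empty).getD y []
      = (es.filter (fun p => p.2 == y)).map (fun p => p.1) := by
  have h := PySem.Dict.getD_foldl_modify_append
      (es.map (fun p => (p.2, p.1))) (PySem.Dict.empty (κ := Int) (ν := List Int)) y
  rw [List.foldl_map, List.filter_map, List.map_map, PySem.Dict.getD_empty] at h
  simpa using h

theorem scanline_contains (es : List (Int × Int)) (y : Int) :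
    ((es.foldl (fun (d : PySem.Dict Int (List Int)) p => d.modify p.2 [] (· ++ [p.1]))
        PySem.Dict.empty).contains y = true) ↔ y ∈ es.map (fun p => p.2) := by
  rw [PySem.Dict.contains_iff_mem_keys,
      PySem.Dict.keys_foldl_modify_key es (fun p => p.2) [] (fun _ p => (· ++ [p.1]))
        PySem.Dict.empty,
      PySem.Dict.keys_empty, PySem.Set.update_nil_left, PySem.Set.mem_ofList]

-- the main equivalence, stated on the shared edge-point list -----------------------

theorem pv_core (ep : List (Int × Int)) (hep : ep ≠ []) :
    (let es := PySem.List.sorted2 ep (fun p => p.2) (fun p => p.1)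
     let y_min := (PySem.List.pyGetD es 0 (0, 0)).2
     let y_max := (PySem.List.pyGetD es (-1) (0, 0)).2
     let scanline := es.foldl
       (fun (d : PySem.Dict Int (List Int)) p => d.modify p.2 [] (· ++ [p.1])) PySem.Dict.empty
     (PySem.List.pyRange y_min (y_max + 1) 1).foldl (fun acc y =>
       if scanline.contains y then
         let x_points := PySem.List.sorted (scanline.getD y []) (fun x => x)
         (PySem.List.pyRange (PySem.List.pyGetD x_points 0 0)
             (PySem.List.pyGetD x_points (-1) 0 + 1) 1).foldl
           (fun acc x => acc ++ [(x, y)]) acc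
       else acc) [])
    = (let st := ep.foldl pvStep (PySem.Dict.empty, none, none)
       match st.2.1, st.2.2 with
       | some y_min, some y_max =>
         (PySem.List.pyRange y_min (y_max + 1) 1).foldl (fun acc y =>
           match st.1.get? y with
           | some b =>
             (PySem.List.pyRange b.1 (b.2 + 1) 1).foldl (fun acc x => acc ++ [(x, y)]) acc
           | none => acc) []
       | _, _ => []) := by
  obtain ⟨q, rest, hqe⟩ := List.exists_cons_of_ne_nil hep
  obtain ⟨hBget, hBmin, hBmax⟩ := pvStep_foldl ep PySem.Dict.empty none none
    (by intro y v hv; rw [PySem.Dict.get?_empty] at hv; cases hv)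
  have hperm : (PySem.List.sorted2 ep (fun p => p.2) (fun p => p.1)).Perm ep :=
    PySem.List.sorted2_perm ep _ _ false
  have hes_ne : PySem.List.sorted2 ep (fun p => p.2) (fun p => p.1) ≠ [] := by
    intro h
    apply hep
    have hl := hperm.length_eq
    rw [h] at hl
    exact List.eq_nil_of_length_eq_zero hl.symm
  obtain ⟨m, t, hmt⟩ := List.exists_cons_of_ne_nil hes_ne
  have hpair := sorted2_pairwise_snd ep
  have hmin_es : ∀ p ∈ ep, m.2 ≤ p.2 := fun p hp =>
    head_min_of_pairwise (fun p => p.2) hmt hpair p (hperm.mem_iff.mpr hp)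
  have hmax_es : ∀ p ∈ ep,
      p.2 ≤ ((PySem.List.sorted2 ep (fun p => p.2) (fun p => p.1)).getLast hes_ne).2 :=
    fun p hp => getLast_max_of_pairwise (fun p => p.2) hes_ne hpair p (hperm.mem_iff.mpr hp)
  have hsnds : ep.map (fun p => p.2) = q.2 :: rest.map (fun p => p.2) := by rw [hqe]; rfl
  have hBmin' : (ep.foldl pvStep (PySem.Dict.empty, none, none)).2.1
      = some ((rest.map (fun p => p.2)).foldl min q.2) := by
    rw [hBmin, hsnds, pvOMin_cons]
    simp only [pvNMin]
    rw [pvOMin_some]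
  have hBmax' : (ep.foldl pvStep (PySem.Dict.empty, none, none)).2.2
      = some ((rest.map (fun p => p.2)).foldl max q.2) := by
    rw [hBmax, hsnds, pvOMax_cons]
    simp only [pvNMax]
    rw [pvOMax_some]
  have hbmin_le : ∀ z ∈ ep.map (fun p => p.2), (rest.map (fun p => p.2)).foldl min q.2 ≤ z := by
    intro z hz
    rw [hsnds] at hz
    rcases List.mem_cons.mp hz with rfl | hz
    · exact (PySem.List.foldl_min_le _ _).1
    · exact (PySem.List.foldl_min_le _ _).2 z hz
  have hbmin_mem : (rest.map (fun p => p.2)).foldl min q.2 ∈ ep.map (fun p => p.2) := by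
    rw [hsnds]
    rcases PySem.List.foldl_min_mem (rest.map (fun p => p.2)) q.2 with h | h
    · rw [h]; exact List.mem_cons_self
    · exact List.mem_cons_of_mem _ h
  have hbmax_ge : ∀ z ∈ ep.map (fun p => p.2), z ≤ (rest.map (fun p => p.2)).foldl max q.2 := by
    intro z hz
    rw [hsnds] at hz
    rcases List.mem_cons.mp hz with rfl | hz
    · exact (PySem.List.le_foldl_max _ _).1
    · exact (PySem.List.le_foldl_max _ _).2 z hz
  have hbmax_mem : (rest.map (fun p => p.2)).foldl max q.2 ∈ ep.map (fun p => p.2) := by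
    rw [hsnds]
    rcases PySem.List.foldl_max_mem (rest.map (fun p => p.2)) q.2 with h | h
    · rw [h]; exact List.mem_cons_self
    · exact List.mem_cons_of_mem _ h
  have hymin : (PySem.List.pyGetD (PySem.List.sorted2 ep (fun p => p.2) (fun p => p.1)) 0 (0, 0)).2
      = (rest.map (fun p => p.2)).foldl min q.2 := by
    rw [hmt, PySem.List.pyGetD_zero_cons]
    apply le_antisymm
    · obtain ⟨p, hp, hpz⟩ := List.mem_map.mp hbmin_mem
      exact hpz ▸ hmin_es p hp
    · refine hbmin_le m.2 (List.mem_map.mpr ⟨m, ?_, rfl⟩)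
      exact hperm.mem_iff.mp (hmt ▸ List.mem_cons_self)
  have hymax : (PySem.List.pyGetD (PySem.List.sorted2 ep (fun p => p.2) (fun p => p.1)) (-1) (0, 0)).2
      = (rest.map (fun p => p.2)).foldl max q.2 := by
    rw [PySem.List.pyGetD_neg_one _ _ hes_ne]
    apply le_antisymm
    · refine hbmax_ge _ (List.mem_map.mpr ⟨_, ?_, rfl⟩)
      exact hperm.mem_iff.mp (List.getLast_mem hes_ne)
    · obtain ⟨p, hp, hpz⟩ := List.mem_map.mp hbmax_mem
      exact hpz ▸ hmax_es p hp
  dsimp only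
  rw [hymin, hymax, hBmin', hBmax']
  apply PySem.List.foldl_congr_mem
  intro acc y _
  have hget : (ep.foldl pvStep (PySem.Dict.empty, none, none)).1.get? y
      = pvMM none ((ep.filter (fun p => p.2 == y)).map (fun p => p.1)) := by
    rw [hBget y, PySem.Dict.get?_empty]
  cases hxs : (ep.filter (fun p => p.2 == y)).map (fun p => p.1) with
  | nil =>
    have hno : y ∉ ep.map (fun p => p.2) := by
      intro hy'
      obtain ⟨p, hp, rfl⟩ := List.mem_map.mp hy'
      have hpf : p.1 ∈ (ep.filter (fun p' => p'.2 == p.2)).map (fun p => p.1) :=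
        List.mem_map.mpr ⟨p, List.mem_filter.mpr ⟨hp, by simp⟩, rfl⟩
      rw [hxs] at hpf
      cases hpf
    have hcf : (((PySem.List.sorted2 ep (fun p => p.2) (fun p => p.1)).foldl
        (fun (d : PySem.Dict Int (List Int)) p => d.modify p.2 [] (· ++ [p.1]))
        PySem.Dict.empty).contains y) = false := by
      cases hc : (((PySem.List.sorted2 ep (fun p => p.2) (fun p => p.1)).foldl
          (fun (d : PySem.Dict Int (List Int)) p => d.modify p.2 [] (· ++ [p.1]))
          PySem.Dict.empty).contains y) with
      | false => rfl
      | true =>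
        exfalso
        apply hno
        have := (scanline_contains _ y).mp hc
        rw [← (hperm.map (fun p => p.2)).mem_iff]
        exact this
    rw [hcf, hget, hxs]
    simp [pvMM]
  | cons x t' =>
    have hyes : y ∈ ep.map (fun p => p.2) := by
      have : x ∈ (ep.filter (fun p => p.2 == y)).map (fun p => p.1) := by
        rw [hxs]; exact List.mem_cons_self
      obtain ⟨p, hp, _⟩ := List.mem_map.mp this
      obtain ⟨hpmem, hpy⟩ := List.mem_filter.mp hp
      exact List.mem_map.mpr ⟨p, hpmem, by simpa using hpy⟩
    have hct : (((PySem.List.sorted2 ep (fun p => p.2) (fun p => p.1)).foldl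
        (fun (d : PySem.Dict Int (List Int)) p => d.modify p.2 [] (· ++ [p.1]))
        PySem.Dict.empty).contains y) = true := by
      rw [scanline_contains _ y, (hperm.map (fun p => p.2)).mem_iff]
      exact hyes
    -- the row of A, sorted, equals sorted (x :: t')
    have hsp : PySem.List.sorted
        (((PySem.List.sorted2 ep (fun p => p.2) (fun p => p.1)).filter
          (fun p => p.2 == y)).map (fun p => p.1)) (fun x => x)
        = PySem.List.sorted (x :: t') (fun x => x) := by
      apply PySem.List.sorted_eq_sorted_of_perm _ _ _ (fun a b h => h)
      rw [← hxs]
      exact (hperm.filter _).map _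
    have hsne : PySem.List.sorted (x :: t') (fun x => x) ≠ [] := by
      intro h
      exact List.cons_ne_nil x t' ((PySem.List.sorted_eq_nil_iff _ _ _).mp h)
    obtain ⟨mx, tx, hmx⟩ := List.exists_cons_of_ne_nil hsne
    have hhead : ∀ z ∈ x :: t', mx ≤ z := PySem.List.key_head_sorted_le _ _ hmx
    have hmemmx : mx ∈ x :: t' := by
      rw [← PySem.List.mem_sorted (x :: t') (fun x => x) false, hmx]
      exact List.mem_cons_self
    have hminx : (PySem.List.pyGetD (PySem.List.sorted (x :: t') (fun x => x)) 0 0)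
        = t'.foldl min x := by
      rw [hmx, PySem.List.pyGetD_zero_cons]
      apply le_antisymm
      · rcases PySem.List.foldl_min_mem t' x with h | h
        · rw [h]; exact hhead x List.mem_cons_self
        · exact hhead _ (List.mem_cons_of_mem _ h)
      · rcases List.mem_cons.mp hmemmx with rfl | h
        · exact (PySem.List.foldl_min_le _ _).1
        · exact (PySem.List.foldl_min_le _ _).2 _ h
    have hplast := PySem.List.sorted_pairwise (x :: t') (fun x => x)
    have hlast_mem : (PySem.List.sorted (x :: t') (fun x => x)).getLast hsne ∈ x :: t' := by
      rw [← PySem.List.mem_sorted (x :: t') (fun x => x) false]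
      exact List.getLast_mem hsne
    have hmaxx : (PySem.List.pyGetD (PySem.List.sorted (x :: t') (fun x => x)) (-1) 0)
        = t'.foldl max x := by
      rw [PySem.List.pyGetD_neg_one _ _ hsne]
      apply le_antisymm
      · rcases List.mem_cons.mp hlast_mem with h | h
        · rw [h]; exact (PySem.List.le_foldl_max _ _).1
        · exact (PySem.List.le_foldl_max _ _).2 _ h
      · rcases PySem.List.foldl_max_mem t' x with h | h
        · rw [h]
          exact getLast_max_of_pairwise (fun z => z) hsne hplast x
            ((PySem.List.mem_sorted _ _ _ _).mpr List.mem_cons_self)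
        · exact getLast_max_of_pairwise (fun z => z) hsne hplast _
            ((PySem.List.mem_sorted _ _ _ _).mpr (List.mem_cons_of_mem _ h))
    rw [hct, hget, hxs]
    rw [scanline_getD, hsp, hminx, hmaxx]
    have hmmval : pvMM none (x :: t') = some (t'.foldl min x, t'.foldl max x) := by
      show pvMM (some (x, x)) t' = _
      rw [pvMM_some]
    rw [hmmval]
    rfl

-- ===== VERDICT (by name: the statement is the Claim_ definition above) =====
theorem fill_polygon_spec : Claim_equal_fill_polygon := by
  intro pp _ hpre
  unfold Spec_fill_polygon
  show fill_polygon pp = fill_polygon_alt pp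
  unfold fill_polygon fill_polygon_alt
  exact pv_core (pvEdgePoints pp) (pvEdgePoints_ne_nil pp hpre)
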